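-- pv_equiv track=rewrite | github.com/luandro/hermes-portfolio-manager | portfolio_manager/worktree.py | _parse_porcelain
-- ===== SOURCE A (Python) =====
-- def _parse_porcelain(porcelain: str) -> tuple[list[str], list[str], list[str]]:
--     """Parse git status --porcelain=v1 output.
--
--     Returns (modified_tracked, untracked, conflict) file lists.
--     """
--     modified: list[str] = []
--     untracked: list[str] = []
--     conflict: list[str] = []
--
--     for line in porcelain.splitlines():
--         if not line:
--             continue
--         xy = line[:2]
--         filepath = line[3:]
--         # For rename/copy entries, extract the destination path
--         if " -> " in filepath:
--             filepath = filepath.split(" -> ", 1)[1]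
--         # Conflict indicators: UU, AA, DD, AU, UA, DU, UD
--         if xy in ("UU", "AA", "DD", "AU", "UA", "DU", "UD"):
--             conflict.append(filepath)
--         # Untracked
--         elif xy == "??":
--             untracked.append(filepath)
--         # Modified: staged (index) OR unstaged (working tree) changes
--         elif xy[0] not in (" ", "?") or xy[1] not in (" ", "?"):
--             modified.append(filepath)
--
--     return modified, untracked, conflict
-- ===== SOURCE B (Python) =====
-- _CONFLICT = ("UU", "AA", "DD", "AU", "UA", "DU", "UD")
--
--
-- def _classify(line):
--     """Classify one porcelain line into ('M'|'U'|'C', path), or None to ignore it."""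
--     xy = line[:2]
--     path = line[3:]
--     if " -> " in path:
--         path = path.split(" -> ", 1)[1]
--     if xy in _CONFLICT:
--         return ("C", path)
--     if xy == "??":
--         return ("U", path)
--     if any(ch not in " ?" for ch in xy):
--         return ("M", path)
--     return None
--
--
-- def _parse_porcelain(porcelain: str) -> tuple[list[str], list[str], list[str]]:
--     entries = [e for e in map(_classify, porcelain.splitlines()) if e is not None]
--     modified = [p for t, p in entries if t == "M"]
--     untracked = [p for t, p in entries if t == "U"]
--     conflict = [p for t, p in entries if t == "C"]
--     return modified, untracked, conflict
-- ===== Notes on version B (the rewrite author's own statement) =====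
-- stated objective: alternative
-- what changed: A classifies and appends to three lists inside one loop with elif priority; B first maps each line through a classifier producing tagged (tag, path) entries (None for ignorable lines), then builds the three output lists with three separate filter passes over that entry list.
-- outside the precondition, e.g. on _parse_porcelain(' '): A raises IndexError, B returns ([], [], []); on _parse_porcelain('?'): A raises IndexError, B returns ([], [], [])
import Mathlib
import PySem

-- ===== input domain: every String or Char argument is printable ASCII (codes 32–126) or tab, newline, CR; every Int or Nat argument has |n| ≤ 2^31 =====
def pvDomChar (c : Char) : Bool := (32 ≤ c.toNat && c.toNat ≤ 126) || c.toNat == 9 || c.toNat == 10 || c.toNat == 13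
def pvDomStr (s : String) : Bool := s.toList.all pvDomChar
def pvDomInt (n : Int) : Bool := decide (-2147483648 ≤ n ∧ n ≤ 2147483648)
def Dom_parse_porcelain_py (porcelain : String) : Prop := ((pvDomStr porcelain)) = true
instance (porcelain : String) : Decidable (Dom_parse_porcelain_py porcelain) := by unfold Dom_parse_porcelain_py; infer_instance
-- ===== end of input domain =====

-- B re-decomposes A's single three-way loop into a per-line classifier plus three filter passes
-- over the classified entries (objective: alternative decomposition, same cost).

-- ===== PORT A =====
-- one loop, three accumulators, elif priority conflict > untracked > modified
def pvStepA (st : List String × List String × List String) (line : String) :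
    List String × List String × List String :=
  if line == "" then st
  else
    let xy := PySem.Str.slice line none (some 2)
    let fp0 := PySem.Str.slice line (some 3) none
    -- ' -> ' in filepath: take the piece after the first occurrence (split(" -> ", 1)[1])
    let fp := if PySem.Str.isIn " -> " fp0 then
        (((PySem.Str.splitMax? fp0 " -> " 1).getD [fp0]).getD 1 fp0)
      else fp0
    if ["UU", "AA", "DD", "AU", "UA", "DU", "UD"].contains xy then
      (st.1, st.2.1, st.2.2 ++ [fp])
    else if xy == "??" then
      (st.1, st.2.1 ++ [fp], st.2.2)
    -- xy[0]/xy[1]: pyGet?; the '.getD ' '' arm is only reached where Python raises (outside Pre_)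
    else if !(((PySem.Str.pyGet? xy 0).getD ' ') == ' ' || ((PySem.Str.pyGet? xy 0).getD ' ') == '?')
            || !(((PySem.Str.pyGet? xy 1).getD ' ') == ' ' || ((PySem.Str.pyGet? xy 1).getD ' ') == '?') then
      (st.1 ++ [fp], st.2.1, st.2.2)
    else st

def parse_porcelain_py (porcelain : String) : List String × List String × List String :=
  (PySem.Str.splitlines porcelain).foldl pvStepA ([], [], [])

-- ===== PORT B =====
def pvClassify (line : String) : Option (String × String) :=
  let xy := PySem.Str.slice line none (some 2)
  let path0 := PySem.Str.slice line (some 3) none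
  let path := if PySem.Str.isIn " -> " path0 then
      (((PySem.Str.splitMax? path0 " -> " 1).getD [path0]).getD 1 path0)
    else path0
  if ["UU", "AA", "DD", "AU", "UA", "DU", "UD"].contains xy then some ("C", path)
  else if xy == "??" then some ("U", path)
  else if xy.toList.any (fun ch => !(ch == ' ' || ch == '?')) then some ("M", path)
  else none

def parse_porcelain_py_alt (porcelain : String) : List String × List String × List String :=
  let entries := (PySem.Str.splitlines porcelain).filterMap pvClassify
  ((entries.filter (fun e => e.1 == "M")).map (·.2),
   (entries.filter (fun e => e.1 == "U")).map (·.2),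
   (entries.filter (fun e => e.1 == "C")).map (·.2))

-- ===== PRECONDITION & SPEC =====
-- Pre_ excludes exactly the porcelain strings containing a line " " or "?": there A evaluates
-- xy[1] on a one-character xy and raises IndexError.
def Pre_parse_porcelain_py (porcelain : String) : Prop :=
  ∀ l ∈ PySem.Str.splitlines porcelain, ¬(l = " " ∨ l = "?")
instance (porcelain : String) : Decidable (Pre_parse_porcelain_py porcelain) := by
  unfold Pre_parse_porcelain_py; infer_instance

def pvWitness_parse_porcelain_py : String := "M  a.txt\n?? new\nUU both"

def Spec_parse_porcelain_py (porcelain : String) (out : List String × List String × List String) : Prop :=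
  out = parse_porcelain_py_alt porcelain
instance (porcelain : String) (out : List String × List String × List String) :
    Decidable (Spec_parse_porcelain_py porcelain out) := by
  unfold Spec_parse_porcelain_py; infer_instance

-- ===== CLAIM (what is proved, stated in full; the proofs are below) =====
def Claim_equal_parse_porcelain_py : Prop := ∀ (porcelain : String), Dom_parse_porcelain_py porcelain → Pre_parse_porcelain_py porcelain → Spec_parse_porcelain_py porcelain (parse_porcelain_py porcelain)

-- ===== LEMMAS AND PROOFS =====

-- A's elif condition on xy equals B's 'any' whenever xy has at most two characters.
lemma pvCond_eq (xy : String) (h : xy.toList.length ≤ 2) :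
    (!(((PySem.Str.pyGet? xy 0).getD ' ') == ' ' || ((PySem.Str.pyGet? xy 0).getD ' ') == '?')
      || !(((PySem.Str.pyGet? xy 1).getD ' ') == ' ' || ((PySem.Str.pyGet? xy 1).getD ' ') == '?'))
    = xy.toList.any (fun ch => !(ch == ' ' || ch == '?')) := by
  match hx : xy.toList with
  | [] => simp [PySem.Str.pyGet?, PySem.Chars.pyGet?, PySem.List.pyGet?, PySem.List.pyIdx?, hx]
  | [a] => simp [PySem.Str.pyGet?, PySem.Chars.pyGet?, PySem.List.pyGet?, PySem.List.pyIdx?, hx]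
  | a :: b :: rest =>
    have : rest = [] := by
      rw [hx] at h; simpa using h
    subst this
    simp [PySem.Str.pyGet?, PySem.Chars.pyGet?, PySem.List.pyGet?, PySem.List.pyIdx?, hx, Bool.or_comm]

lemma pvSlice2_len (line : String) :
    (PySem.Str.slice line none (some 2)).toList.length ≤ 2 := by
  simp [PySem.Str.toList_slice, PySem.Chars.slice_eq_listSlice, PySem.List.slice]

lemma pvStep_classify (m u c : List String) (line : String) :
    pvStepA (m, u, c) line =
      (match pvClassify line with
       | none => (m, u, c)
       | some (t, p) =>
         if t == "M" then (m ++ [p], u, c)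
         else if t == "U" then (m, u ++ [p], c)
         else (m, u, c ++ [p])) := by
  by_cases hline : line = ""
  · subst hline
    have h1 : pvClassify "" = none := by decide
    rw [h1]; simp [pvStepA]
  · unfold pvStepA pvClassify
    simp only [beq_iff_eq, hline, if_false]
    rw [pvCond_eq _ (pvSlice2_len line)]
    split_ifs <;> simp_all

lemma pvFold_eq (ls : List String) (m u c : List String) :
    ls.foldl pvStepA (m, u, c) =
      (m ++ ((ls.filterMap pvClassify).filter (fun e => e.1 == "M")).map (·.2),
       u ++ ((ls.filterMap pvClassify).filter (fun e => e.1 == "U")).map (·.2),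
       c ++ ((ls.filterMap pvClassify).filter (fun e => e.1 == "C")).map (·.2)) := by
  induction ls generalizing m u c with
  | nil => simp
  | cons l ls ih =>
    simp only [List.foldl_cons, pvStep_classify, List.filterMap_cons]
    match hcl : pvClassify l with
    | none => simp [ih]
    | some (t, p) =>
      have ht : t = "C" ∨ t = "U" ∨ t = "M" := by
        unfold pvClassify at hcl
        dsimp only at hcl
        split_ifs at hcl <;> simp_all
      rcases ht with h | h | h <;> subst h <;> simp [ih]

-- ===== VERDICT (by name: the statement is the Claim_ definition above) =====
theorem parse_porcelain_py_spec : Claim_equal_parse_porcelain_py := by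
  intro porcelain _ _
  unfold Spec_parse_porcelain_py parse_porcelain_py parse_porcelain_py_alt
  rw [pvFold_eq]
  simp
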